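-- pv_equiv track=rewrite | github.com/cam-douglas/quark | QUARK_STATE_SYSTEM.py | _compute_status
-- ===== SOURCE A (Python) =====
-- def _compute_status(md_text: str) -> str:
--     """Return Planned / In Progress / Complete for given roadmap markdown."""
--     # Collect task lines (milestones, goals, SOTA practices)
--     task_lines = [ln for ln in md_text.splitlines() if ln.strip().startswith("* [")]
--     if not task_lines:
--         return "Planned"
--     done_flags = ["DONE" in ln for ln in task_lines]
--     if all(done_flags):
--         return "Complete"
--     if any(done_flags):
--         return "In Progress"
--     return "Planned"
-- ===== SOURCE B (Python) =====
-- def _compute_status(md_text: str) -> str: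
--     """Return Planned / In Progress / Complete for given roadmap markdown."""
--     # Short-circuiting state machine: track whether a done and an undone task
--     # line have been seen; stop scanning as soon as both kinds occur.
--     seen_done = False
--     seen_undone = False
--     for ln in md_text.splitlines():
--         if not ln.strip().startswith("* ["):
--             continue
--         if "DONE" in ln:
--             seen_done = True
--         else:
--             seen_undone = True
--         if seen_done and seen_undone:
--             return "In Progress"
--     return "Complete" if seen_done else "Planned"
-- ===== Notes on version B (the rewrite author's own statement) =====
-- stated objective: alternative
-- what changed: Replaces A's three staged passes (build task_lines, build done_flags, reduce with all()/any()) by a short-circuiting two-flag state machine over the lines that stops scanning and answers as soon as both a done and an undone task have been seen, so the final classification needs no intermediate lists or counts.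
import Mathlib
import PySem

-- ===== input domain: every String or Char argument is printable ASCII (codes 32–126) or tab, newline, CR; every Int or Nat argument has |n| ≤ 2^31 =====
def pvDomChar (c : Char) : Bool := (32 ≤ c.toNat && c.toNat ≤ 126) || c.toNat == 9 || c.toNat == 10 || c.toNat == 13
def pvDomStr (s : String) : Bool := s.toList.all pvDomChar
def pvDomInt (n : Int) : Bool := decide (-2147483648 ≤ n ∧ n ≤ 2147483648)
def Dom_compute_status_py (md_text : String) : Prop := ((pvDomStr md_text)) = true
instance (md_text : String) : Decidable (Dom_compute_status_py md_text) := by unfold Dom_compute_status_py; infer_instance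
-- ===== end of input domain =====

-- B replaces A's staged list passes (task_lines, done_flags, all()/any()) by a short-circuiting
-- two-flag state machine over the lines that exits as soon as the status is determined (objective: alternative).

-- ===== PORT A =====
def compute_status_py (md_text : String) : String :=
  let task_lines := (PySem.Str.splitlines md_text).filter
    (fun ln => PySem.Str.startswith (PySem.Str.strip ln) "* [")
  if task_lines.isEmpty then "Planned"
  else
    let done_flags := task_lines.map (fun ln => PySem.Str.isIn "DONE" ln)
    if done_flags.all id then "Complete"
    else if done_flags.any id then "In Progress"
    else "Planned"

-- ===== PORT B =====
-- the loop of Source B: recursion over the remaining lines with the two boolean flags as state,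
-- returning "In Progress" early when both flags are set
def computeStatusLoopB : List String → Bool → Bool → String
  | [], seen_done, _ => if seen_done then "Complete" else "Planned"
  | ln :: rest, seen_done, seen_undone =>
    if !(PySem.Str.startswith (PySem.Str.strip ln) "* [") then
      computeStatusLoopB rest seen_done seen_undone
    else
      let seen_done' := if PySem.Str.isIn "DONE" ln then true else seen_done
      let seen_undone' := if PySem.Str.isIn "DONE" ln then seen_undone else true
      if seen_done' && seen_undone' then "In Progress"
      else computeStatusLoopB rest seen_done' seen_undone'

def compute_status_py_alt (md_text : String) : String :=
  computeStatusLoopB (PySem.Str.splitlines md_text) false false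

-- ===== PRECONDITION & SPEC =====
def Spec_compute_status_py (md_text : String) (out : String) : Prop := out = compute_status_py_alt md_text
instance (md_text : String) (out : String) : Decidable (Spec_compute_status_py md_text out) := by unfold Spec_compute_status_py; infer_instance

-- ===== CLAIM (what is proved, stated in full; the proofs are below) =====
def Claim_equal_compute_status_py : Prop := ∀ (md_text : String), Dom_compute_status_py md_text → Spec_compute_status_py md_text (compute_status_py md_text)


-- ===== LEMMAS AND PROOFS =====

-- Closed characterisation of B's state machine (the early-exit loop never runs with both
-- flags already set, hence the hypothesis): its answer depends only on whether a done
-- task line and an undone task line occur among the remaining lines or recorded flags.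
theorem computeStatusLoopB_eq (L : List String) (sd su : Bool) (h : (sd && su) = false) :
    computeStatusLoopB L sd su =
      (if (sd || L.any (fun ln => PySem.Str.startswith (PySem.Str.strip ln) "* [" && PySem.Str.isIn "DONE" ln))
          && (su || L.any (fun ln => PySem.Str.startswith (PySem.Str.strip ln) "* [" && !PySem.Str.isIn "DONE" ln))
       then "In Progress"
       else if sd || L.any (fun ln => PySem.Str.startswith (PySem.Str.strip ln) "* [" && PySem.Str.isIn "DONE" ln)
       then "Complete" else "Planned") := by
  induction L generalizing sd su with
  | nil => cases sd <;> cases su <;> simp_all [computeStatusLoopB]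
  | cons ln rest ih =>
    have ih10 := ih true false rfl
    have ih01 := ih false true rfl
    have ih00 := ih false false rfl
    by_cases hpl : PySem.Str.startswith (PySem.Str.strip ln) "* [" <;>
      by_cases hql : PySem.Str.isIn "DONE" ln <;>
        cases sd <;> cases su <;>
          first
          | (exact absurd h (by decide))
          | (cases hA : rest.any (fun ln => PySem.Str.startswith (PySem.Str.strip ln) "* [" && PySem.Str.isIn "DONE" ln) <;>
             cases hB : rest.any (fun ln => PySem.Str.startswith (PySem.Str.strip ln) "* [" && !PySem.Str.isIn "DONE" ln) <;>
             simp only [computeStatusLoopB, List.any_cons, hpl, hql, hA, hB, ih10, ih01, ih00,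
               Bool.not_true, Bool.not_false, Bool.true_and, Bool.false_and, Bool.and_true,
               Bool.and_false, Bool.true_or, Bool.false_or, Bool.or_true, Bool.or_false,
               Bool.and_self, Bool.or_self, Bool.false_eq_true, Bool.true_eq_false,
               eq_self_iff_true, if_true, if_false, ite_true, ite_false, reduceIte])

-- Pure list fact: A's staged classification (empty / all / any over the filtered tasks)
-- coincides with the two-existence classification B's state machine computes.
theorem classify_eq (F : List String) (q : String → Bool) :
    (if F.isEmpty then "Planned"
     else if (F.map q).all id then "Complete"
     else if (F.map q).any id then "In Progress" else "Planned") =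
    (if F.any q && F.any (fun ln => !q ln) then "In Progress"
     else if F.any q then "Complete" else "Planned") := by
  by_cases hemp : F.isEmpty
  · have hnil : F = [] := List.isEmpty_iff.mp hemp
    subst hnil; simp
  · have hne : F ≠ [] := fun hn => hemp (by simp [hn])
    rw [if_neg hemp]
    have hallm : (F.map q).all id = F.all q := by simp
    have hanym : (F.map q).any id = F.any q := by simp
    rw [hallm, hanym]
    by_cases ha : F.all q
    · obtain ⟨x, hx⟩ := List.exists_mem_of_ne_nil F hne
      have h1 : F.any q = true :=
        List.any_eq_true.mpr ⟨x, hx, List.all_eq_true.mp ha x hx⟩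
      have h2 : F.any (fun ln => !q ln) = false := by
        rw [List.any_eq_false]
        intro y hy
        simp [List.all_eq_true.mp ha y hy]
      simp [ha, h1, h2]
    · have ha' : F.all q = false := by
        cases hv : F.all q
        · rfl
        · exact absurd hv ha
      obtain ⟨x, hx, hqx⟩ := List.all_eq_false.mp ha'
      have h2 : F.any (fun ln => !q ln) = true :=
        List.any_eq_true.mpr ⟨x, hx, by simp [Bool.eq_false_iff.mpr hqx]⟩
      rw [if_neg ha, h2, Bool.and_true]
      by_cases hq : F.any q <;> simp [hq]

theorem compute_status_py_eq_alt (md_text : String) :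
    compute_status_py md_text = compute_status_py_alt md_text := by
  unfold compute_status_py compute_status_py_alt
  rw [computeStatusLoopB_eq _ false false rfl]
  rw [Bool.false_or, Bool.false_or, ← List.any_filter, ← List.any_filter]
  exact classify_eq _ _

-- ===== VERDICT (by name: the statement is the Claim_ definition above) =====
theorem compute_status_py_spec : Claim_equal_compute_status_py := by
  intro md_text _
  exact compute_status_py_eq_alt md_text
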